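-- pv_equiv track=rewrite | github.com/miggazElquez/brainfuck | to_bf_compiler.py | format_bf
-- ===== SOURCE A (Python) =====
-- def format_bf(prog,debug_mode=True):
-- 	if debug_mode:
-- 		t = []
-- 		index = 0
-- 		while index < len(prog):
-- 			if prog[index] in '[]<>+-.,':
-- 				t.append(prog[index])
-- 				index += 1
-- 			elif prog[index] == '#':
-- 				t.append('#')
-- 				index += 1
-- 				try:
-- 					if prog[index] == '(':
-- 						index += 1
-- 						t.append('(')
-- 						while prog[index] != ')':
-- 							t.append(prog[index])
-- 							index+=1
-- 						t.append(')')
-- 				except IndexError: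
-- 					pass
-- 			else:
-- 				index+=1
-- 		return ''.join(t)
--
-- 	return ''.join(i for i in prog if i in '[]<>+-.,')
-- ===== SOURCE B (Python) =====
-- def format_bf(prog, debug_mode=True):
--     bf = set('[]<>+-.,')
--     if not debug_mode:
--         return ''.join(c for c in prog if c in bf)
--     out = []
--     i = 0
--     while True:
--         j = prog.find('#', i)
--         if j == -1:
--             out.extend(c for c in prog[i:] if c in bf)
--             return ''.join(out)
--         out.extend(c for c in prog[i:j] if c in bf)
--         out.append('#')
--         if prog[j+1:j+2] == '(':
--             k = prog.find(')', j+2)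
--             if k == -1:
--                 out.append(prog[j+1:])
--                 return ''.join(out)
--             out.append(prog[j+1:k+1])
--             i = k + 1
--         else:
--             i = j + 1
-- ===== Notes on version B (the rewrite author's own statement) =====
-- stated objective: alternative
-- what changed: A's per-character index state machine with a try/except for the comment scan is replaced by a chunk-based scan that jumps between '#' markers with str.find, bulk-filters the text between markers, and slices comment bodies out whole.
import Mathlib
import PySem

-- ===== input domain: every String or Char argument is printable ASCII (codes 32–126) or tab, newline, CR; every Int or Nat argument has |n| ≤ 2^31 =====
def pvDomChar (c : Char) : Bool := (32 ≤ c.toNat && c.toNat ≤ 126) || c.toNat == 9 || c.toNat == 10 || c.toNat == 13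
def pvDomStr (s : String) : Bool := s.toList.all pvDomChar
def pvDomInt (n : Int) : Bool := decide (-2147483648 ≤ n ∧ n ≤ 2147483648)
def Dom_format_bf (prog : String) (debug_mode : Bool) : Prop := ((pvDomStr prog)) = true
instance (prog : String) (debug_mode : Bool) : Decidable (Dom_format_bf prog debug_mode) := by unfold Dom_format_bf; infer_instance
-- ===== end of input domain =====

-- B rewrites A's per-character index state machine (with its try/except) as a chunk-based
-- scan that jumps between '#' markers with str.find; objective: alternative (same cost class).
-- Loops are ported with a structural fuel parameter; every call site supplies enough fuel
-- (the proofs use the invariant s.length ≤ fuel + index), so the fuel case never truncates.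

-- the character set '[]<>+-.,'
def pvBF : List Char := ['[', ']', '<', '>', '+', '-', '.', ',']

-- ===== PORT A =====
-- inner `while prog[index] != ')'` loop of A; returns the grown accumulator and the new
-- index; running off the end models the IndexError caught by A's `except: pass`
-- (the loop state is then kept and the outer while exits, since index = len).
def pvAInner (s : List Char) : Nat → Nat → List Char → List Char × Nat
  | 0, j, acc => (acc, j)
  | fuel + 1, j, acc =>
    if h : j < s.length then
      if s[j] = ')' then (acc ++ [')'], j + 1)
      else pvAInner s fuel (j + 1) (acc ++ [s[j]])
    else (acc, j)

-- outer while loop of A over the index, accumulator t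
def pvALoop (s : List Char) : Nat → Nat → List Char → List Char
  | 0, _, t => t
  | fuel + 1, i, t =>
    if h : i < s.length then
      if s[i] ∈ pvBF then pvALoop s fuel (i + 1) (t ++ [s[i]])
      else if s[i] = '#' then
        if h2 : i + 1 < s.length then
          if s[i + 1] = '(' then
            let r := pvAInner s s.length (i + 2) (t ++ ['#', '('])
            pvALoop s fuel r.2 r.1
          else pvALoop s fuel (i + 1) (t ++ ['#'])
        else t ++ ['#']   -- IndexError on prog[index]: caught, outer loop then exits
      else pvALoop s fuel (i + 1) t
    else t

def format_bf (prog : String) (debug_mode : Bool) : String :=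
  if debug_mode then String.ofList (pvALoop prog.toList prog.toList.length 0 [])
  else String.ofList (prog.toList.filter (· ∈ pvBF))

-- ===== PORT B =====
-- port of Python's prog.find(c, i) for a single character c and 0 ≤ i (exact there):
-- index of the first occurrence of c at position ≥ i, none for -1
def pvFindFrom (s : List Char) (c : Char) : Nat → Nat → Option Nat
  | 0, _ => none
  | fuel + 1, i =>
    if h : i < s.length then
      if s[i] = c then some i else pvFindFrom s c fuel (i + 1)
    else none

-- the `while True` chunk loop of B, from position i (returns the remaining output)
def pvBLoop (s : List Char) : Nat → Nat → List Char
  | 0, _ => []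
  | fuel + 1, i =>
    match pvFindFrom s '#' s.length i with
    | none => (s.drop i).filter (· ∈ pvBF)
    | some j =>
      let pre := ((s.extract i j).filter (· ∈ pvBF)) ++ ['#']
      if s[j + 1]? = some '(' then
        match pvFindFrom s ')' s.length (j + 2) with
        | none => pre ++ s.drop (j + 1)
        | some k => pre ++ s.extract (j + 1) (k + 1) ++ pvBLoop s fuel (k + 1)
      else pre ++ pvBLoop s fuel (j + 1)

def format_bf_alt (prog : String) (debug_mode : Bool) : String :=
  if debug_mode then String.ofList (pvBLoop prog.toList prog.toList.length 0)
  else String.ofList (prog.toList.filter (· ∈ pvBF))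

-- ===== PRECONDITION & SPEC =====
def Spec_format_bf (prog : String) (debug_mode : Bool) (out : String) : Prop := out = format_bf_alt prog debug_mode
instance (prog : String) (debug_mode : Bool) (out : String) : Decidable (Spec_format_bf prog debug_mode out) := by unfold Spec_format_bf; infer_instance

-- ===== CLAIM (what is proved, stated in full; the proofs are below) =====
def Claim_equal_format_bf : Prop := ∀ (prog : String) (debug_mode : Bool), Dom_format_bf prog debug_mode → Spec_format_bf prog debug_mode (format_bf prog debug_mode)

-- ===== LEMMAS AND PROOFS =====

theorem pvFindFrom_none {s : List Char} {c : Char} (fuel : Nat) {i : Nat}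
    (h : ¬ i < s.length) : pvFindFrom s c fuel i = none := by
  cases fuel with
  | zero => rfl
  | succ fuel => simp [pvFindFrom, h]

theorem pvFindFrom_bounds {s : List Char} {c : Char} (fuel : Nat) {i j : Nat} :
    pvFindFrom s c fuel i = some j → i ≤ j ∧ j < s.length := by
  induction fuel generalizing i with
  | zero => intro h; simp [pvFindFrom] at h
  | succ fuel ih =>
    intro h
    rw [pvFindFrom] at h
    split at h
    · split at h
      · simp at h; omega
      · have := ih h; omega
    · simp at h

theorem pvFindFrom_irrel {s : List Char} {c : Char} {fuel fuel' i : Nat}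
    (hf : s.length ≤ fuel + i) (hf' : s.length ≤ fuel' + i) :
    pvFindFrom s c fuel i = pvFindFrom s c fuel' i := by
  induction fuel generalizing fuel' i with
  | zero => rw [pvFindFrom_none fuel' (by omega), pvFindFrom_none 0 (by omega)]
  | succ fuel ih =>
    cases fuel' with
    | zero => rw [pvFindFrom_none (fuel + 1) (by omega), pvFindFrom_none 0 (by omega)]
    | succ fuel' =>
      rw [pvFindFrom, pvFindFrom]
      split
      · split
        · rfl
        · exact ih (by omega) (by omega)
      · rfl

theorem pvFind_self {s : List Char} {c : Char} {i : Nat} (h : i < s.length)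
    (hc : s[i] = c) : pvFindFrom s c s.length i = some i := by
  rw [pvFindFrom_irrel (fuel' := s.length + 1) (by omega) (by omega), pvFindFrom]
  simp [h, hc]

theorem pvFind_succ {s : List Char} {c : Char} {i : Nat} (h : i < s.length)
    (hc : s[i] ≠ c) : pvFindFrom s c s.length i = pvFindFrom s c s.length (i + 1) := by
  rw [pvFindFrom_irrel (fuel' := s.length + 1) (by omega) (by omega), pvFindFrom]
  simp [h, hc]

theorem pvExtract_cons {s : List Char} {i j : Nat} (h : i < s.length) (hij : i < j) :
    s.extract i j = s[i] :: s.extract (i + 1) j := by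
  rw [List.extract_eq_take_drop, List.extract_eq_take_drop,
    show j - i = (j - (i + 1)) + 1 by omega, List.drop_eq_getElem_cons h,
    List.take_succ_cons]

theorem pvExtract_nil {s : List Char} {i : Nat} : s.extract i i = [] := by
  simp

theorem pvDrop_cons {s : List Char} {i : Nat} (h : i < s.length) :
    s.drop i = s[i] :: s.drop (i + 1) := List.drop_eq_getElem_cons h

theorem pvBLoop_nil {s : List Char} (fuel : Nat) {i : Nat} (h : ¬ i < s.length) :
    pvBLoop s fuel i = [] := by
  cases fuel with
  | zero => rfl
  | succ fuel =>
    rw [pvBLoop, pvFindFrom_none s.length h]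
    simp [List.drop_eq_nil_of_le (by omega : s.length ≤ i)]

-- the loop result does not depend on the (sufficient) fuel
theorem pvBLoop_irrel {s : List Char} {fuel fuel' i : Nat}
    (hf : s.length ≤ fuel + i) (hf' : s.length ≤ fuel' + i) :
    pvBLoop s fuel i = pvBLoop s fuel' i := by
  induction fuel generalizing fuel' i with
  | zero => rw [pvBLoop_nil fuel' (by omega), pvBLoop_nil 0 (by omega)]
  | succ fuel ih =>
    cases fuel' with
    | zero => rw [pvBLoop_nil (fuel + 1) (by omega), pvBLoop_nil 0 (by omega)]
    | succ fuel' =>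
      rw [pvBLoop, pvBLoop]
      cases hfind : pvFindFrom s '#' s.length i with
      | none => rfl
      | some j =>
        have hb := pvFindFrom_bounds s.length hfind
        simp only
        split
        · cases hg : pvFindFrom s ')' s.length (j + 2) with
          | none => rfl
          | some k =>
            have hbk := pvFindFrom_bounds s.length hg
            have hik : pvBLoop s fuel (k + 1) = pvBLoop s fuel' (k + 1) :=
              ih (by omega) (by omega)
            simp [hik]
        · have hij : pvBLoop s fuel (j + 1) = pvBLoop s fuel' (j + 1) :=
            ih (by omega) (by omega)
          simp [hij]

-- B skips a non-'#' character, keeping it iff it is a bf command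
theorem pvBLoop_step {s : List Char} {fuel fuel' i : Nat} (h : i < s.length)
    (hc : s[i] ≠ '#') (hf : s.length ≤ fuel + i) (hf' : s.length ≤ fuel' + (i + 1)) :
    pvBLoop s fuel i = (if s[i] ∈ pvBF then [s[i]] else []) ++ pvBLoop s fuel' (i + 1) := by
  cases fuel with
  | zero => omega
  | succ fuel =>
    cases fuel' with
    | zero =>
      have hi1 : ¬ i + 1 < s.length := by omega
      rw [pvBLoop_nil 0 hi1, pvBLoop, pvFind_succ h hc, pvFindFrom_none s.length hi1,
        pvDrop_cons h, List.drop_eq_nil_of_le (by omega : s.length ≤ i + 1)]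
      simp [List.filter_cons]
    | succ fuel' =>
      rw [pvBLoop, pvBLoop, pvFind_succ h hc]
      cases hfind : pvFindFrom s '#' s.length (i + 1) with
      | none =>
        simp only [pvDrop_cons h, List.filter_cons]
        split_ifs <;> simp_all
      | some j =>
        have hb := pvFindFrom_bounds s.length hfind
        simp only
        rw [pvExtract_cons h (by omega), List.filter_cons]
        have hrec : ∀ k : Nat, i + 2 ≤ k → pvBLoop s fuel k = pvBLoop s fuel' k := fun k hk =>
          pvBLoop_irrel (by omega) (by omega)
        have h1 : pvBLoop s fuel (j + 1) = pvBLoop s fuel' (j + 1) := hrec _ (by omega)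
        split_ifs
        all_goals
          cases hg : pvFindFrom s ')' s.length (j + 2) with
          | none => simp_all
          | some k =>
            have hbk := pvFindFrom_bounds s.length hg
            have h2 : pvBLoop s fuel (k + 1) = pvBLoop s fuel' (k + 1) := hrec _ (by omega)
            simp_all

-- B's handling of a '#' marker
theorem pvBLoop_hash {s : List Char} {fuel fuel' i : Nat} (h : i < s.length)
    (hhash : s[i] = '#') (hf : s.length ≤ fuel + i) (hf' : s.length ≤ fuel' + (i + 1)) :
    pvBLoop s fuel i = '#' ::
      (if s[i + 1]? = some '(' then
        match pvFindFrom s ')' s.length (i + 2) with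
        | none => s.drop (i + 1)
        | some k => s.extract (i + 1) (k + 1) ++ pvBLoop s fuel' (k + 1)
      else pvBLoop s fuel' (i + 1)) := by
  cases fuel with
  | zero => omega
  | succ fuel =>
    rw [pvBLoop, pvFind_self h hhash]
    simp only [pvExtract_nil, List.filter_nil, List.nil_append]
    split_ifs
    · cases hg : pvFindFrom s ')' s.length (i + 2) with
      | none => rfl
      | some k =>
        have hbk := pvFindFrom_bounds s.length hg
        have hik : pvBLoop s fuel (k + 1) = pvBLoop s fuel' (k + 1) :=
          pvBLoop_irrel (by omega) (by omega)
        simp [hik]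
    · rw [pvBLoop_irrel (fuel' := fuel') (by omega) (by omega)]
      rfl

-- A's inner comment scan, characterised by find ')'
theorem pvAInner_char {s : List Char} (fuel : Nat) (j : Nat) (acc : List Char)
    (hj : j ≤ s.length) (hf : s.length ≤ fuel + j) :
    pvAInner s fuel j acc =
      match pvFindFrom s ')' s.length j with
      | none => (acc ++ s.drop j, s.length)
      | some k => (acc ++ s.extract j (k + 1), k + 1) := by
  induction fuel generalizing j acc with
  | zero =>
    have hjl : j = s.length := by omega
    rw [pvFindFrom_none s.length (by omega)]
    simp [pvAInner, hjl]
  | succ fuel ih =>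
    by_cases h : j < s.length
    case neg =>
      have hjl : j = s.length := by omega
      rw [pvFindFrom_none s.length (by omega)]
      simp [pvAInner, hjl]
    rw [pvAInner]
    by_cases hc : s[j] = ')'
    · rw [pvFind_self h hc]
      simp only [h, dif_pos, if_pos hc]
      rw [pvExtract_cons h (by omega), hc, pvExtract_nil]
    · rw [pvFind_succ h hc]
      simp only [h, dif_pos, if_neg hc]
      rw [ih (j + 1) (acc ++ [s[j]]) (by omega) (by omega)]
      cases hg : pvFindFrom s ')' s.length (j + 1) with
      | none => rw [pvDrop_cons h]; simp
      | some k =>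
        have hbk := pvFindFrom_bounds s.length hg
        have he : s.extract j (k + 1) = s[j] :: s.extract (j + 1) (k + 1) :=
          pvExtract_cons h (by omega : j < k + 1)
        simp [he]

theorem pvALoop_eq {s : List Char} (fuel : Nat) (i : Nat) (t : List Char) (fuel' : Nat)
    (hf : s.length ≤ fuel + i) (hf' : s.length ≤ fuel' + i) :
    pvALoop s fuel i t = t ++ pvBLoop s fuel' i := by
  induction fuel generalizing i t fuel' with
  | zero => rw [pvBLoop_nil fuel' (by omega)]; simp [pvALoop]
  | succ fuel ih =>
    by_cases h : i < s.length
    case neg => rw [pvBLoop_nil fuel' h]; simp [pvALoop, h]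
    rw [pvALoop]
    simp only [h, dif_pos]
    by_cases hbf : s[i] ∈ pvBF
    · have hc : s[i] ≠ '#' := by intro hh; rw [hh] at hbf; revert hbf; decide
      rw [if_pos hbf, ih (i + 1) (t ++ [s[i]]) fuel' (by omega) (by omega),
        pvBLoop_step h hc hf' (fuel' := fuel') (by omega)]
      simp [hbf]
    rw [if_neg hbf]
    by_cases hhash : s[i] = '#'
    case neg =>
      rw [if_neg hhash, ih (i + 1) t fuel' (by omega) (by omega),
        pvBLoop_step h hhash hf' (fuel' := fuel') (by omega)]
      simp [hbf]
    rw [if_pos hhash, pvBLoop_hash h hhash hf' (fuel' := fuel') (by omega)]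
    by_cases h2 : i + 1 < s.length
    case neg =>
      have hget : s[i + 1]? = none := by
        rw [List.getElem?_eq_none]
        omega
      simp only [h2, dif_neg, not_false_iff, hget]
      rw [if_neg (by simp), pvBLoop_nil fuel' h2]
    have hget : s[i + 1]? = some s[i + 1] := List.getElem?_eq_getElem h2
    simp only [h2, dif_pos]
    by_cases hpar : s[i + 1] = '('
    case neg =>
      rw [if_neg hpar, if_neg (by simp [hget, hpar]),
        ih (i + 1) (t ++ ['#']) fuel' (by omega) (by omega)]
      simp
    rw [if_pos hpar, if_pos (by simp [hget, hpar])]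
    rw [pvAInner_char s.length (i + 2) (t ++ ['#', '(']) (by omega) (by omega)]
    cases hg : pvFindFrom s ')' s.length (i + 2) with
    | none =>
      have hih := ih s.length (t ++ ['#', '('] ++ s.drop (i + 2)) fuel' (by omega) (by omega)
      have hd : s.drop (i + 1) = '(' :: s.drop (i + 2) := by rw [pvDrop_cons h2, hpar]
      have hnil : pvBLoop s fuel' s.length = [] := pvBLoop_nil fuel' (by omega)
      simp only [hnil, List.append_nil] at hih
      simp [hd]
      simpa using hih
    | some k =>
      have hbk := pvFindFrom_bounds s.length hg
      have hih := ih (k + 1) (t ++ ['#', '('] ++ s.extract (i + 2) (k + 1)) fuel' (by omega) (by omega)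
      have he : s.extract (i + 1) (k + 1) = '(' :: s.extract (i + 2) (k + 1) := by
        rw [pvExtract_cons h2 (by omega : i + 1 < k + 1), hpar]
      simp [he]
      simpa using hih

-- ===== VERDICT (by name: the statement is the Claim_ definition above) =====
theorem format_bf_spec : Claim_equal_format_bf := by
  intro prog debug_mode _
  unfold Spec_format_bf format_bf format_bf_alt
  cases debug_mode <;> simp
  have h := pvALoop_eq (s := prog.toList) prog.toList.length 0 [] prog.toList.length
    (by omega) (by omega)
  simp at h
  rw [h]
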